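-- pv_equiv track=rewrite | github.com/gen-yuu/mlmodel | const_model.py | get_parameters_conb
-- ===== SOURCE A (Python) =====
-- import itertools
--
-- def get_parameters_conb(parameters, min_size=2):
--     """
--     特徴量の組み合わせを生成する。
--
--     Args:
--         parameters (list): 特徴量のリスト
--         min_size (int): 組み合わせの最小サイズ（デフォルトは2）
--
--     Returns:
--         list: 特徴量の組み合わせリスト
--     """
--     conbs = [
--         list(conb)
--         for n in range(min_size,
--                        len(parameters) + 1)
--         for conb in itertools.combinations(parameters, n)
--     ]
--     return conbs
-- ===== SOURCE B (Python) =====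
-- def get_parameters_conb(parameters, min_size=2):
--     # Single right-to-left DP pass sharing work across all sizes:
--     # table[k] = size-k combinations (in itertools order) of the suffix scanned so far.
--     table = [[[]]]
--     for x in reversed(parameters):
--         new = [table[0]]
--         for prev, cur in zip(table, table[1:]):
--             new.append([[x] + c for c in prev] + cur)
--         new.append([[x] + c for c in table[-1]])
--         table = new
--     return [c for row in table[max(min_size, 0):] for c in row]
-- ===== Notes on version B (the rewrite author's own statement) =====
-- stated objective: alternative
-- what changed: Replaces the per-size itertools.combinations calls with a single right-to-left DP pass that maintains a table of combinations of every size at once and slices off the rows below min_size.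
-- outside the precondition, e.g. on get_parameters_conb(['a'], -1): A raises ValueError, B returns [[], ['a']]
import Mathlib
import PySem

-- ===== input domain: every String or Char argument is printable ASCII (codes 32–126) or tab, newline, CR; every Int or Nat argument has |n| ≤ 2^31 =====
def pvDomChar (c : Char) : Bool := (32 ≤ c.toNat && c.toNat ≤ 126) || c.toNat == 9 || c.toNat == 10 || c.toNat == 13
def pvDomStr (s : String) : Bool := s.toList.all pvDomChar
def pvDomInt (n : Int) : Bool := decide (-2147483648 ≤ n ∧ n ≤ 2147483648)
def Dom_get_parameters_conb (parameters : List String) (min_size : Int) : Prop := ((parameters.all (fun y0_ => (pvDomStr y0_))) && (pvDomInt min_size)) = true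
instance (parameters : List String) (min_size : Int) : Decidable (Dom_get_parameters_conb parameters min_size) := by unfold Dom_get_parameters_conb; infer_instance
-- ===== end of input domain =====

-- B replaces the per-size itertools.combinations calls with one right-to-left DP pass
-- that maintains a table of all combination sizes at once (objective: alternative, same cost).

-- ===== PORT A =====
-- itertools.combinations(xs, n) in positional-lexicographic order (library call,
-- ported as the standard recursion producing exactly itertools' output order).
def pvCombinationsA : List String → Nat → List (List String)
  | _, 0 => [[]]
  | [], _ + 1 => []
  | x :: rest, k + 1 =>
      ((pvCombinationsA rest k).map (fun c => x :: c)) ++ pvCombinationsA rest (k + 1)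

def get_parameters_conb (parameters : List String) (min_size : Int) : List (List String) :=
  (PySem.List.pyRange min_size ((parameters.length : Int) + 1) 1).flatMap
    (fun n => pvCombinationsA parameters n.toNat)

-- ===== PORT B =====
-- the inner `for prev, cur in zip(table, table[1:])` loop of Source B, together with the
-- trailing `new.append([[x] + c for c in table[-1]])`; pvGrowB prepends `new = [table[0]]`.
def pvGrowAuxB (x : String) : List (List (List String)) → List (List (List String))
  | [] => []
  | [last] => [last.map (fun c => x :: c)]
  | prev :: cur :: rest =>
      ((prev.map (fun c => x :: c)) ++ cur) :: pvGrowAuxB x (cur :: rest)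

def pvGrowB (x : String) (table : List (List (List String))) : List (List (List String)) :=
  match table with
  | [] => []
  | h :: _ => h :: pvGrowAuxB x table

def get_parameters_conb_alt (parameters : List String) (min_size : Int) : List (List String) :=
  (PySem.List.slice
    (parameters.reverse.foldl (fun t x => pvGrowB x t) [[[]]])
    (some (max min_size 0)) none).flatten

-- ===== PRECONDITION & SPEC =====
-- A raises ValueError (itertools.combinations with negative r) whenever min_size < 0.
def Pre_get_parameters_conb (parameters : List String) (min_size : Int) : Prop := 0 ≤ min_size
instance (parameters : List String) (min_size : Int) : Decidable (Pre_get_parameters_conb parameters min_size) := by unfold Pre_get_parameters_conb; infer_instance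
def pvWitness_get_parameters_conb : List String × Int := (["a", "b", "c"], 2)

def Spec_get_parameters_conb (parameters : List String) (min_size : Int) (out : List (List String)) : Prop := out = get_parameters_conb_alt parameters min_size
instance (parameters : List String) (min_size : Int) (out : List (List String)) : Decidable (Spec_get_parameters_conb parameters min_size out) := by unfold Spec_get_parameters_conb; infer_instance

-- ===== CLAIM (what is proved, stated in full; the proofs are below) =====
def Claim_equal_get_parameters_conb : Prop := ∀ (parameters : List String) (min_size : Int), Dom_get_parameters_conb parameters min_size → Pre_get_parameters_conb parameters min_size → Spec_get_parameters_conb parameters min_size (get_parameters_conb parameters min_size)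

-- ===== LEMMAS AND PROOFS =====

-- B's table after scanning the suffix p: row k holds the size-k combinations of p.
def pvTableOf (p : List String) : List (List (List String)) :=
  (List.range (p.length + 1)).map (fun k => pvCombinationsA p k)

theorem pvCombinationsA_nil_of_lt (p : List String) :
    ∀ k, p.length < k → pvCombinationsA p k = [] := by
  induction p with
  | nil =>
    intro k hk
    cases k with
    | zero => omega
    | succ k => rfl
  | cons x rest ih =>
    intro k hk
    cases k with
    | zero => simp at hk
    | succ k =>
      simp only [List.length_cons] at hk
      simp [pvCombinationsA, ih k (by omega), ih (k + 1) (by omega)]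

theorem pvGrowAuxB_eq (x : String) (p : List String) :
    ∀ (n j : Nat), 0 < n → j + n = p.length + 1 →
      pvGrowAuxB x ((List.range' j n).map (fun k => pvCombinationsA p k)) =
        (List.range' (j + 1) n).map (fun k => pvCombinationsA (x :: p) k) := by
  intro n
  induction n with
  | zero => omega
  | succ m ih =>
    intro j hpos hjn
    cases m with
    | zero =>
      -- single row left: j = p.length, and the size-(j+1) row of p is empty
      have hj : j = p.length := by omega
      simp only [List.range'_succ, List.range'_zero, List.map_cons, List.map_nil]
      have hhead : pvCombinationsA (x :: p) (j + 1) =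
          ((pvCombinationsA p j).map (fun c => x :: c)) ++ pvCombinationsA p (j + 1) := rfl
      rw [hhead, pvCombinationsA_nil_of_lt p (j + 1) (by omega)]
      simp [pvGrowAuxB]
    | succ m' =>
      rw [List.range'_succ, List.range'_succ, List.map_cons, List.map_cons]
      have ihh := ih (j + 1) (by omega) (by omega)
      rw [List.range'_succ, List.map_cons] at ihh
      show (((pvCombinationsA p j).map (fun c => x :: c)) ++ pvCombinationsA p (j + 1)) ::
          pvGrowAuxB x (pvCombinationsA p (j + 1) ::
            (List.range' (j + 1 + 1) m').map (fun k => pvCombinationsA p k)) = _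
      rw [ihh]
      rw [List.range'_succ, List.range'_succ, List.map_cons, List.map_cons]
      rfl

theorem pvGrowB_table (x : String) (p : List String) :
    pvGrowB x (pvTableOf p) = pvTableOf (x :: p) := by
  have haux := pvGrowAuxB_eq x p (p.length + 1) 0 (by omega) (by omega)
  unfold pvTableOf
  simp only [List.length_cons, List.range_eq_range'] at haux ⊢
  rw [List.range'_succ, List.map_cons]
  rw [show p.length + 1 + 1 = (p.length + 1) + 1 from rfl, List.range'_succ, List.map_cons]
  unfold pvGrowB
  simp only []
  rw [List.range'_succ, List.map_cons] at haux
  rw [haux]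
  have h0 : ∀ q : List String, pvCombinationsA q 0 = [[]] := fun q => by cases q <;> rfl
  rw [h0, h0]

theorem pvFoldB_eq (l s : List String) :
    l.foldl (fun t x => pvGrowB x t) (pvTableOf s) = pvTableOf (l.reverse ++ s) := by
  induction l generalizing s with
  | nil => simp
  | cons x rest ih =>
    simp only [List.foldl_cons, pvGrowB_table, List.reverse_cons, List.append_assoc]
    exact ih (x :: s)

-- ===== VERDICT (by name: the statement is the Claim_ definition above) =====
theorem get_parameters_conb_spec : Claim_equal_get_parameters_conb := by
  intro parameters min_size _ hpre
  have hpre' : (0 : Int) ≤ min_size := hpre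
  unfold Spec_get_parameters_conb get_parameters_conb get_parameters_conb_alt
  have htab : parameters.reverse.foldl (fun t x => pvGrowB x t) [[[]]] = pvTableOf parameters := by
    have h := pvFoldB_eq parameters.reverse []
    simpa [pvTableOf] using h
  rw [htab]
  have hmax : max min_size 0 = min_size := by omega
  rw [hmax, PySem.List.slice_from _ hpre']
  unfold pvTableOf
  rw [PySem.List.pyRange_one, List.flatMap_map, ← List.map_drop, ← List.flatMap_def]
  have hdrop : (List.range (parameters.length + 1)).drop min_size.toNat
      = List.range' min_size.toNat (parameters.length + 1 - min_size.toNat) := by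
    simp [List.range_eq_range', List.drop_range']
  rw [hdrop, List.range'_eq_map_range, List.flatMap_map]
  have hcnt : (((parameters.length : Int) + 1) - min_size).toNat
      = parameters.length + 1 - min_size.toNat := by omega
  rw [hcnt]
  have hfun : (fun k : Nat => pvCombinationsA parameters (min_size + (k : Int)).toNat)
      = fun k : Nat => pvCombinationsA parameters (min_size.toNat + k) := by
    funext k
    congr 1
    omega
  exact congrArg (fun g => List.flatMap g (List.range (parameters.length + 1 - min_size.toNat))) hfun
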